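-- pv_equiv track=rewrite | github.com/kaisalb/SWU | kabastCSVprocessing.py | format_aspects
-- ===== SOURCE A (Python) =====
-- def format_aspects(aspect_list):
--     """
--     Sorts aspects so that primary colors come before Heroism/Villainy.
--     Vigilance, Command, Aggression, Cunning, THEN Heroism, Villainy, Neutral.
--     """
--     if not aspect_list or not isinstance(aspect_list, list):
--         return ""
--
--     priority = {
--         "Vigilance": 0, "Command": 1, "Aggression": 2, "Cunning": 3,
--         "Heroism": 4, "Villainy": 5, "Neutral": 6
--     }
--
--     # Standardize names (Title Case)
--     clean_list = list(set([str(a).strip().title() for a in aspect_list if a is not None]))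
--
--     # Sort by priority, then alphabetically for unknown ones
--     sorted_list = sorted(clean_list, key=lambda x: (priority.get(x, 99), x))
--
--     return ", ".join(sorted_list)
-- ===== SOURCE B (Python) =====
-- def format_aspects(aspect_list):
--     """Single pass marking a fixed 7-slot flag table for known aspects and
--     collecting unknown ones in a set, then one small sort of the
--     leftovers (instead of building a set and one composite-key sort)."""
--     if not aspect_list or not isinstance(aspect_list, list):
--         return ""
--     table = ["Vigilance", "Command", "Aggression", "Cunning",
--              "Heroism", "Villainy", "Neutral"]
--     seen = [False] * 7
--     extras = set()
--     for a in aspect_list: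
--         if a is None:
--             continue
--         name = str(a).strip().title()
--         if name in table:
--             seen[table.index(name)] = True
--         else:
--             extras.add(name)
--     parts = [name for name, hit in zip(table, seen) if hit]
--     return ", ".join(parts + sorted(extras))
-- ===== Notes on version B (the rewrite author's own statement) =====
-- stated objective: alternative
-- what changed: Replaces A's build-a-set-then-composite-key-sort by a single pass over the input that marks a fixed 7-slot flag table for known aspects and accumulates unknown names in a set, reading the known part back in table order and sorting only the leftovers alphabetically.
import Mathlib
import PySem

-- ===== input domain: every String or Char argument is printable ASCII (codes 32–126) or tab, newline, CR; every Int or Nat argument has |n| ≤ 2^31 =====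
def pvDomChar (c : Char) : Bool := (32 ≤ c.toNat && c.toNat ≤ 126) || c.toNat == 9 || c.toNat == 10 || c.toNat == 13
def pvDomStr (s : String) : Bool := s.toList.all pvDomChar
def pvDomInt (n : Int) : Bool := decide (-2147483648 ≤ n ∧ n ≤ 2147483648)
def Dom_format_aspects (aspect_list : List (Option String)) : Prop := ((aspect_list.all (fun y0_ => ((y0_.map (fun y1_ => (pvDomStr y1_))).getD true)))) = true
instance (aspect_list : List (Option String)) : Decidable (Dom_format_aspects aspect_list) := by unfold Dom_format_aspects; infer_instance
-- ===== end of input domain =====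

-- B replaces A's build-a-set + composite-key comparison sort by ONE pass over the input
-- that marks a fixed 7-slot flag table for known aspects and accumulates unknown ones,
-- followed by an alphabetical sort of only the leftovers (objective: alternative).

-- hand port of str.title, exact on the ASCII domain (cased = alphabetic): the first
-- alphabetic character after a non-alphabetic one is uppercased, later ones lowercased
def pvTitleChars : List Char → Bool → List Char
  | [], _ => []
  | c :: rest, prevCased =>
    (if PySem.Chars.isalpha c then
      (if prevCased then PySem.Chars.lowerChar c else PySem.Chars.upperChar c)
     else c) :: pvTitleChars rest (PySem.Chars.isalpha c)

-- str(a).strip().title() — shared normalisation step of both Pythons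
def pvNorm (a : String) : String := String.ofList (pvTitleChars (PySem.Str.strip a).toList false)

-- ===== PORT A =====
def pvPriority : PySem.Dict String Int :=
  PySem.Dict.mk [("Vigilance", 0), ("Command", 1), ("Aggression", 2), ("Cunning", 3),
                 ("Heroism", 4), ("Villainy", 5), ("Neutral", 6)]

def format_aspects (aspect_list : List (Option String)) : String :=
  if aspect_list = [] then ""
  else
    let clean_list : PySem.Set String :=
      PySem.Set.ofList ((aspect_list.filterMap id).map pvNorm)
    let sorted_list :=
      PySem.List.sorted2 clean_list (fun x => PySem.Dict.getD pvPriority x 99) (fun x => x)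
    PySem.Str.join ", " sorted_list

-- ===== PORT B =====
def pvTable : List String :=
  ["Vigilance", "Command", "Aggression", "Cunning", "Heroism", "Villainy", "Neutral"]

-- one iteration of B's for-loop: flags ('seen') and the unknown accumulator ('extras');
-- 'seen[table.index(name)] = True' is List.set at the Nat index list.index returns,
-- always in range because it is guarded by 'name in table'
def pvStep (st : List Bool × PySem.Set String) (a : Option String) :
    List Bool × PySem.Set String :=
  match a with
  | none => st
  | some s =>
    let name := pvNorm s
    match PySem.List.index? pvTable name with
    | some i => (st.1.set i true, st.2)
    | none => (st.1, PySem.Set.add st.2 name)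

def format_aspects_alt (aspect_list : List (Option String)) : String :=
  if aspect_list = [] then ""
  else
    let st := aspect_list.foldl pvStep (List.replicate 7 false, PySem.Set.empty)
    let parts := (pvTable.zip st.1).filterMap (fun p => if p.2 then some p.1 else none)
    PySem.Str.join ", " (parts ++ PySem.List.sorted st.2 (fun x => x))

-- ===== PRECONDITION & SPEC =====
def Spec_format_aspects (aspect_list : List (Option String)) (out : String) : Prop := out = format_aspects_alt aspect_list
instance (aspect_list : List (Option String)) (out : String) : Decidable (Spec_format_aspects aspect_list out) := by unfold Spec_format_aspects; infer_instance

-- ===== CLAIM (what is proved, stated in full; the proofs are below) =====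
def Claim_equal_format_aspects : Prop := ∀ (aspect_list : List (Option String)), Dom_format_aspects aspect_list → Spec_format_aspects aspect_list (format_aspects aspect_list)

-- ===== LEMMAS AND PROOFS =====

def pvPr (x : String) : Int := PySem.Dict.getD pvPriority x 99

def pvKey (x : String) : Lex (Int × String) := toLex (pvPr x, x)

-- the flag table / unknown accumulator that B's loop maintains, as a function of the
-- set of names already processed
def pvFlagsOf (S : List String) : List Bool := pvTable.map (fun n => S.contains n)
def pvExtrasOf (S : List String) : List String := S.filter (fun x => !pvTable.contains x)

-- sorted(xs, key=lambda x: (k1(x), k2(x))) is sorted with the lexicographic-product key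
theorem pv_sorted2_lex {α : Type} (xs : List α) (k1 : α → Int) (k2 : α → String) :
    PySem.List.sorted2 xs k1 k2 = PySem.List.sorted xs (fun x => toLex (k1 x, k2 x)) := by
  unfold PySem.List.sorted2 PySem.List.sorted
  have h : (fun a b => decide (k1 a < k1 b) || (!decide (k1 b < k1 a) && decide (k2 a < k2 b)))
      = (fun a b : α => decide ((toLex (k1 a, k2 a) : Lex (Int × String)) < toLex (k1 b, k2 b))) := by
    funext a b
    rw [Bool.eq_iff_iff]
    simp only [Bool.or_eq_true, Bool.and_eq_true, Bool.not_eq_true', decide_eq_true_eq,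
      decide_eq_false_iff_not, Prod.Lex.lt_iff, ofLex_toLex]
    constructor
    · rintro (h1 | ⟨h1, h2⟩)
      · exact Or.inl h1
      · by_cases h3 : k1 a < k1 b
        · exact Or.inl h3
        · exact Or.inr ⟨le_antisymm (not_lt.mp h1) (not_lt.mp h3), h2⟩
    · rintro (h1 | ⟨h1, h2⟩)
      · exact Or.inl h1
      · refine Or.inr ⟨?_, h2⟩
        show ¬ k1 b < k1 a
        rw [show k1 a = k1 b from h1]
        exact lt_irrefl _
  simp only [h]
  rfl

theorem pv_pr_lt_99 : ∀ a ∈ pvTable, pvPr a < 99 := by decide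

theorem pv_pr_eq_99 (x : String) (hx : pvTable.contains x = false) : pvPr x = 99 := by
  simp only [pvTable, List.contains_eq_mem, List.mem_cons, List.not_mem_nil, or_false,
    decide_eq_false_iff_not, not_or] at hx
  obtain ⟨h1, h2, h3, h4, h5, h6, h7⟩ := hx
  have e1 : ("Vigilance" == x) = false := beq_eq_false_iff_ne.mpr (Ne.symm h1)
  have e2 : ("Command" == x) = false := beq_eq_false_iff_ne.mpr (Ne.symm h2)
  have e3 : ("Aggression" == x) = false := beq_eq_false_iff_ne.mpr (Ne.symm h3)
  have e4 : ("Cunning" == x) = false := beq_eq_false_iff_ne.mpr (Ne.symm h4)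
  have e5 : ("Heroism" == x) = false := beq_eq_false_iff_ne.mpr (Ne.symm h5)
  have e6 : ("Villainy" == x) = false := beq_eq_false_iff_ne.mpr (Ne.symm h6)
  have e7 : ("Neutral" == x) = false := beq_eq_false_iff_ne.mpr (Ne.symm h7)
  simp [pvPr, pvPriority, PySem.Dict.getD, PySem.Dict.get?, List.find?,
    e1, e2, e3, e4, e5, e6, e7]

theorem pv_table_pairwise : pvTable.Pairwise (fun a b => pvPr a < pvPr b) := by decide

theorem pv_table_nodup : pvTable.Nodup := by decide

-- A's sorted list is the table-ordered known names followed by the sorted unknown ones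
theorem pv_main (clean : List String) (hc : clean.Nodup) :
    PySem.List.sorted clean pvKey =
      pvTable.filter (fun n => clean.contains n) ++
        PySem.List.sorted (pvExtrasOf clean) (fun x => x) := by
  set known := pvTable.filter (fun n => clean.contains n) with hknown
  set unknown := PySem.List.sorted (pvExtrasOf clean) (fun x => x) with hunknown
  have hperm_unk : unknown.Perm (clean.filter (fun x => !pvTable.contains x)) :=
    PySem.List.sorted_perm _ _ _
  have hmem_unk : ∀ x ∈ unknown, x ∈ clean ∧ pvTable.contains x = false := by
    intro x hx
    have := hperm_unk.mem_iff.mp hx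
    simpa using this
  have hpr_unk : ∀ x ∈ unknown, pvPr x = 99 := fun x hx => pv_pr_eq_99 x (hmem_unk x hx).2
  apply PySem.List.sorted_eq_of_perm_of_pairwise_lt
  · -- permutation
    have h1 : known.Perm (clean.filter (fun x => pvTable.contains x)) := by
      apply (List.perm_ext_iff_of_nodup (pv_table_nodup.filter _) (hc.filter _)).mpr
      intro a
      simp [List.contains_eq_mem, and_comm]
    exact ((h1.append hperm_unk).trans (List.filter_append_perm _ clean))
  · -- pairwise strict increase of the combined key
    rw [List.pairwise_append]
    refine ⟨?_, ?_, ?_⟩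
    · -- known: priorities strictly increase along pvTable
      have := pv_table_pairwise.filter (fun n => clean.contains n)
      exact this.imp (fun h => Prod.Lex.lt_iff.mpr (Or.inl h))
    · -- unknown: all priorities 99, names strictly increase
      have hle : unknown.Pairwise (fun a b => a ≤ b) := PySem.List.sorted_pairwise _ _
      have hnd : unknown.Nodup := hperm_unk.nodup_iff.mpr (hc.filter _)
      have hlt : unknown.Pairwise (fun a b : String => a < b) :=
        (hle.and hnd).imp (fun ⟨h1, h2⟩ => lt_of_le_of_ne h1 h2)
      refine List.Pairwise.imp_of_mem ?_ hlt
      intro a b ha hb h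
      exact Prod.Lex.lt_iff.mpr (Or.inr ⟨by simp [pvKey, hpr_unk a ha, hpr_unk b hb], h⟩)
    · -- cross: every known key is below every unknown key
      intro a ha b hb
      have ha' : a ∈ pvTable := (List.mem_filter.mp ha).1
      have : pvPr a < pvPr b := by
        rw [hpr_unk b hb]; exact pv_pr_lt_99 a ha'
      exact Prod.Lex.lt_iff.mpr (Or.inl this)

-- List.contains through PySem.Set.add
theorem pv_contains_add (S : PySem.Set String) (x y : String) :
    List.contains (PySem.Set.add S x) y = (List.contains S y || y == x) := by
  rw [Bool.eq_iff_iff]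
  simp [List.contains_eq_mem, PySem.Set.mem_add]

-- one step of B's loop advances the invariant state by one 'add'
theorem pv_step_some (S : PySem.Set String) (s : String) :
    pvStep (pvFlagsOf S, pvExtrasOf S) (some s) =
      (pvFlagsOf (PySem.Set.add S (pvNorm s)), pvExtrasOf (PySem.Set.add S (pvNorm s))) := by
  set x := pvNorm s with hx
  show pvStep (pvFlagsOf S, pvExtrasOf S) (some s) = _
  unfold pvStep
  simp only [← hx]
  cases hidx : PySem.List.index? pvTable x with
  | some i =>
    obtain ⟨hk, hget, _⟩ := PySem.List.getElem_of_index?_eq_some hidx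
    have hxmem : x ∈ pvTable := by rw [← hget]; exact List.getElem_mem hk
    have hxc : pvTable.contains x = true := by
      rw [List.contains_eq_mem]; exact decide_eq_true hxmem
    refine Prod.ext ?_ ?_
    · -- flags: setting slot i is exactly remapping membership through 'add'
      show (pvFlagsOf S).set i true = pvFlagsOf (PySem.Set.add S x)
      apply List.ext_getElem
      · simp [pvFlagsOf]
      · intro j hj1 hj2
        simp only [pvFlagsOf, List.length_map] at hj2
        rw [List.getElem_set (by simpa [pvFlagsOf] using hj1)]
        simp only [pvFlagsOf, List.getElem_map]
        rw [pv_contains_add]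
        by_cases hij : i = j
        · subst hij
          rw [hget]
          simp
        · have hne : pvTable[j] ≠ x := by
            rw [← hget]
            intro he
            exact hij ((List.Nodup.getElem_inj_iff pv_table_nodup).mp he).symm
          rw [if_neg hij, beq_eq_false_iff_ne.mpr hne]
          simp
    · -- extras: a known name never enters (or survives in) the unknown accumulator
      show pvExtrasOf S = pvExtrasOf (PySem.Set.add S x)
      rw [PySem.Set.add_eq_ite]
      split
      · rfl
      · simp [pvExtrasOf, List.filter_append, hxmem]
  | none =>
    have hxnot : x ∉ pvTable := by simp [pysem] at hidx; exact hidx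
    have hxc : pvTable.contains x = false := by
      rw [List.contains_eq_mem]; exact decide_eq_false hxnot
    refine Prod.ext ?_ ?_
    · -- flags unchanged: no table entry equals x
      show pvFlagsOf S = pvFlagsOf (PySem.Set.add S x)
      apply List.map_congr_left
      intro n hn
      rw [pv_contains_add]
      have hne : n ≠ x := fun he => hxnot (he ▸ hn)
      rw [beq_eq_false_iff_ne.mpr hne]
      simp
    · -- extras: 'extras.add(name)' is Set.add on the filter of the processed names
      show PySem.Set.add (pvExtrasOf S) x = pvExtrasOf (PySem.Set.add S x)
      by_cases hxS : x ∈ S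
      · rw [PySem.Set.add_of_mem (show x ∈ pvExtrasOf S by
            simp [pvExtrasOf, List.mem_filter, hxS, hxnot]),
          PySem.Set.add_of_mem hxS]
      · rw [PySem.Set.add_of_not_mem
            (show x ∉ pvExtrasOf S from fun hmem => hxS (List.mem_filter.mp hmem).1),
          PySem.Set.add_of_not_mem hxS]
        simp [pvExtrasOf, List.filter_append, hxnot]

-- the loop invariant, run to the end of the list
theorem pv_fold_inv (l : List (Option String)) (S : PySem.Set String) :
    l.foldl pvStep (pvFlagsOf S, pvExtrasOf S) =
      (pvFlagsOf (PySem.Set.update S ((l.filterMap id).map pvNorm)),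
       pvExtrasOf (PySem.Set.update S ((l.filterMap id).map pvNorm))) := by
  induction l generalizing S with
  | nil => simp [PySem.Set.update]
  | cons a t ih =>
    cases a with
    | none =>
      rw [List.foldl_cons]
      simpa [pvStep] using ih S
    | some s =>
      rw [List.foldl_cons, pv_step_some]
      rw [ih (PySem.Set.add S (pvNorm s))]
      simp [PySem.Set.update_cons]

-- reading the flag table back: zip-filter over (table, map f table) is filter f
theorem pv_zip_filterMap {α : Type} (xs : List α) (f : α → Bool) :
    (xs.zip (xs.map f)).filterMap (fun p => if p.2 then some p.1 else none)
      = xs.filter f := by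
  induction xs with
  | nil => rfl
  | cons x t ih => cases hf : f x <;> simp [List.zip_cons_cons, hf, ih]

-- ===== VERDICT (by name: the statement is the Claim_ definition above) =====
theorem format_aspects_spec : Claim_equal_format_aspects := by
  intro aspect_list _
  unfold Spec_format_aspects format_aspects format_aspects_alt
  by_cases h : aspect_list = []
  · simp [h]
  · rw [if_neg h, if_neg h]
    dsimp only
    rw [pv_sorted2_lex]
    rw [show (List.replicate 7 false, (PySem.Set.empty : PySem.Set String))
        = (pvFlagsOf PySem.Set.empty, pvExtrasOf PySem.Set.empty) from rfl]
    rw [pv_fold_inv, PySem.Set.update_empty]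
    dsimp only
    simp only [pvFlagsOf]
    rw [pv_zip_filterMap]
    have := pv_main (PySem.Set.ofList ((aspect_list.filterMap id).map pvNorm))
      (PySem.Set.nodup_ofList _)
    exact congrArg (PySem.Str.join ", ") (by simpa [pvKey, pvPr] using this)
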